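-- pv_equiv track=rewrite | github.com/RHIT-CSSE/csse120-public | PythonProjects/22-Exam3Practice/src/m5_loops_within_loops_sequences.py | plus_minus_minus
-- ===== SOURCE A (Python) =====
-- def plus_minus_minus(sequence):
--     """
--     What comes in:  A sequence of numbers whose length is at least 2.
--     What goes out:
--      Returns the first number in the sequence,
--        minus the second number in the sequence,
--        minus the third number in the sequence,
--        plus  the fourth number in the sequence,
--        minus the fifth number in the sequence,
--        minus the sixth number in the sequence,
--        plus  the seventh number in the sequence,
--        minus the eighth number in the sequence,
--        minus the ninth number in the sequence,
--        etc.
--     Side effects:  None.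
--     Examples:
--       biggest_diff_1( [5, 1, 2, 10, 3, 4, 5, 6, 1, 6, 3] )
--         returns  5 - 1 - 2 + 10 - 3 - 4 + 5 - 6 - 1 + 6 - 3, which is 6.
--
--       biggest_diff_1( [14, 11, 10] )  returns 14 - 11 - 10, which is -7.
--
--       biggest_diff_1( [14, 11] )  returns 14 - 11, which is 3.
--
--       ** ASK YOUR INSTRUCTOR FOR HELP **
--       ** if these examples and the above specification are not clear to you. **
--     Type hints:
--       :type sequence: list[int] | tuple[int]
--     """
--     ###########################################################################
--     # TODO: 2. Implement and test this function.
--     #          Tests have been written for you (above).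
--     ###########################################################################
--     ###########################################################################
--     # -------------------------------------------------------------------------
--     # DIFFICULTY AND TIME RATINGS (see top of this file for explanation)
--     #    DIFFICULTY:      5
--     #    TIME ESTIMATE:  10 minutes.
--     # -------------------------------------------------------------------------
--     total = 0
--     for k in range(len(sequence)):
--         if k % 3 == 0:
--             total = total + sequence[k]
--         else:
--             total = total - sequence[k]
--     return total
-- ===== SOURCE B (Python) =====
-- def plus_minus_minus(sequence):
--     total = 0
--     for i in range(0, len(sequence), 3):
--         window = sequence[i:i + 3]
--         total += window[0] - sum(window[1:])
--     return total
-- ===== Notes on version B (the rewrite author's own statement) =====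
-- stated objective: alternative
-- what changed: Replaced the per-index loop with a k%3 sign branch by a stride-3 loop that slices a 3-element window per step and adds the window head minus the sum of its remaining one or two elements; no modulus or per-element branching remains.
import Mathlib
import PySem

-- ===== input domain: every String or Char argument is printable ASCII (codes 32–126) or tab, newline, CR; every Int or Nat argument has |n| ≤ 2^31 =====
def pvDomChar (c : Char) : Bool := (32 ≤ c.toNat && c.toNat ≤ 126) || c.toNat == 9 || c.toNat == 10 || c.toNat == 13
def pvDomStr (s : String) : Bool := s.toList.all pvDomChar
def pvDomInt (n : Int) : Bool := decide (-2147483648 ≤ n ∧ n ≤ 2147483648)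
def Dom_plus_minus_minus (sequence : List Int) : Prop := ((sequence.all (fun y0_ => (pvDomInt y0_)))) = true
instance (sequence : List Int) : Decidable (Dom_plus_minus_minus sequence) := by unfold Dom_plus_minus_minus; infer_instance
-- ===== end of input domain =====

-- ===== PORT A =====
-- B replaces the per-index k%3 sign branch by a stride-3 loop over 3-element windows (different decomposition).
def plus_minus_minus (sequence : List Int) : Int :=
  (PySem.List.pyRange 0 (sequence.length : Int) 1).foldl
    (fun total k =>
      if PySem.Int.mod k 3 = 0 then total + PySem.List.pyGetD sequence k 0
      else total - PySem.List.pyGetD sequence k 0) 0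

-- ===== PORT B =====
-- the window slice is PySem.List.slice; its head access is pyGetD (always in range since i < len); the rest-of-window slice is slice from 1.
def plus_minus_minus_alt (sequence : List Int) : Int :=
  (PySem.List.pyRange 0 (sequence.length : Int) 3).foldl
    (fun total i =>
      let window := PySem.List.slice sequence (some i) (some (i + 3))
      total + (PySem.List.pyGetD window 0 0 - (PySem.List.slice window (some 1) none).sum)) 0

-- ===== PRECONDITION & SPEC =====
def Spec_plus_minus_minus (sequence : List Int) (out : Int) : Prop := out = plus_minus_minus_alt sequence
instance (sequence : List Int) (out : Int) : Decidable (Spec_plus_minus_minus sequence out) := by unfold Spec_plus_minus_minus; infer_instance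

-- ===== CLAIM (what is proved, stated in full; the proofs are below) =====
def Claim_equal_plus_minus_minus : Prop := ∀ (sequence : List Int), Dom_plus_minus_minus sequence → Spec_plus_minus_minus sequence (plus_minus_minus sequence)

-- ===== LEMMAS AND PROOFS =====

-- proof-only helper: the common chunk-of-three value both loops compute
def chunkSum (xs : List Int) : Int :=
  match xs with
  | [] => 0
  | x :: rest => x - (rest.take 2).sum + chunkSum (rest.drop 2)
termination_by xs.length
decreasing_by simp

theorem chunkSum_nil : chunkSum [] = 0 := by rw [chunkSum]

theorem chunkSum_cons (x : Int) (rest : List Int) :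
    chunkSum (x :: rest) = x - (rest.take 2).sum + chunkSum (rest.drop 2) := by
  rw [chunkSum]

-- step-3 range peel lemmas (PySem has cons forms only for step ±1)
theorem pyRange3_nil (a b : Int) (h : b ≤ a) : PySem.List.pyRange a b 3 = [] := by
  rw [PySem.List.pyRange_of_pos a b (by norm_num)]
  simp [if_neg (not_lt.mpr h)]

theorem pyRange3_cons (a b : Int) (h : a < b) :
    PySem.List.pyRange a b 3 = a :: PySem.List.pyRange (a + 3) b 3 := by
  rw [PySem.List.pyRange_of_pos a b (by norm_num),
      PySem.List.pyRange_of_pos (a + 3) b (by norm_num)]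
  have hN : (if a < b then ((b - a + 3 - 1) / 3).toNat else 0)
      = (if a + 3 < b then ((b - (a + 3) + 3 - 1) / 3).toNat else 0) + 1 := by
    split_ifs <;> omega
  rw [hN, List.range_succ_eq_map, List.map_cons, List.map_map]
  congr 1
  · simp
  · apply List.map_congr_left
    intro k _
    simp only [Function.comp_apply]
    push_cast
    ring

theorem pmm_auxA (n : Nat) : ∀ (full : List Int) (s : Nat), full.length - s = n → 3 ∣ s →
    ∀ acc : Int,
      (PySem.List.pyRange (s : Int) (full.length : Int) 1).foldl
        (fun total k =>
          if PySem.Int.mod k 3 = 0 then total + PySem.List.pyGetD full k 0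
          else total - PySem.List.pyGetD full k 0) acc
      = acc + chunkSum (full.drop s) := by
  induction n using Nat.strong_induction_on with
  | _ n ih =>
    intro full s hn hdvd acc
    by_cases hlt : s < full.length
    · -- peel the chunk starting at index s
      have h0 : (s : Int) < (full.length : Int) := by exact_mod_cast hlt
      have hm0 : PySem.Int.mod (s : Int) 3 = 0 :=
        (PySem.Int.mod_eq_zero_iff_dvd _ _).mpr (by exact_mod_cast hdvd)
      rw [PySem.List.pyRange_one_cons h0]
      simp only [List.foldl_cons, hm0, if_pos, PySem.List.pyGetD_natCast]
      rw [List.drop_eq_getElem_cons hlt, chunkSum_cons]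
      have hg0 : full.getD s 0 = full[s] := List.getD_eq_getElem full 0 hlt
      by_cases h1 : s + 1 < full.length
      · have e1 : (s : Int) + 1 = ((s + 1 : Nat) : Int) := by push_cast; ring
        have h1' : ((s + 1 : Nat) : Int) < (full.length : Int) := by exact_mod_cast h1
        have hm1 : ¬ PySem.Int.mod ((s + 1 : Nat) : Int) 3 = 0 := by
          rw [PySem.Int.mod_eq_zero_iff_dvd]
          obtain ⟨t, rfl⟩ := hdvd; push_cast; omega
        rw [e1, PySem.List.pyRange_one_cons h1']
        simp only [List.foldl_cons, hm1, PySem.List.pyGetD_natCast, if_false]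
        rw [List.drop_eq_getElem_cons h1]
        have hg1 : full.getD (s + 1) 0 = full[s + 1] := List.getD_eq_getElem full 0 h1
        by_cases h2 : s + 2 < full.length
        · have e2 : ((s + 1 : Nat) : Int) + 1 = ((s + 2 : Nat) : Int) := by push_cast; ring
          have h2' : ((s + 2 : Nat) : Int) < (full.length : Int) := by exact_mod_cast h2
          have hm2 : ¬ PySem.Int.mod ((s + 2 : Nat) : Int) 3 = 0 := by
            rw [PySem.Int.mod_eq_zero_iff_dvd]
            obtain ⟨t, rfl⟩ := hdvd; push_cast; omega
          rw [e2, PySem.List.pyRange_one_cons h2']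
          simp only [List.foldl_cons, hm2, PySem.List.pyGetD_natCast, if_false]
          rw [List.drop_eq_getElem_cons h2]
          have hg2 : full.getD (s + 2) 0 = full[s + 2] := List.getD_eq_getElem full 0 h2
          have e3 : ((s + 2 : Nat) : Int) + 1 = ((s + 3 : Nat) : Int) := by push_cast; ring
          rw [e3, ih (full.length - (s + 3)) (by omega) full (s + 3) rfl (by omega)]
          simp only [List.take, List.drop, List.sum_cons, List.sum_nil]
          rw [hg0, hg1, hg2]
          ring
        · -- exactly two elements remain: full.length = s + 2
          have hone : (full.length : Int) ≤ ((s + 1 : Nat) : Int) + 1 := by push_cast; omega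
          rw [PySem.List.pyRange_one_eq_nil hone, List.foldl_nil]
          have hd2 : full.drop (s + 2) = [] := List.drop_eq_nil_of_le (by omega)
          rw [hd2]
          simp only [List.take, List.drop, List.sum_cons, List.sum_nil, chunkSum_nil]
          rw [hg0, hg1]
          ring
      · -- exactly one element remains: full.length = s + 1
        have hone : (full.length : Int) ≤ (s : Int) + 1 := by exact_mod_cast Nat.le_of_not_lt h1
        rw [PySem.List.pyRange_one_eq_nil hone, List.foldl_nil]
        have hd1 : full.drop (s + 1) = [] := List.drop_eq_nil_of_le (by omega)
        rw [hd1]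
        simp only [List.take_nil, List.drop_nil, List.sum_nil, chunkSum_nil]
        rw [hg0]
        ring
    · have h1 : (full.length : Int) ≤ (s : Int) := by exact_mod_cast Nat.le_of_not_lt hlt
      rw [PySem.List.pyRange_one_eq_nil h1]
      have hd : full.drop s = [] := List.drop_eq_nil_of_le (by omega)
      rw [hd]
      simp [chunkSum_nil]

theorem pmm_auxB (n : Nat) : ∀ (full : List Int) (s : Nat), full.length - s = n →
    ∀ acc : Int,
      (PySem.List.pyRange (s : Int) (full.length : Int) 3).foldl
        (fun total i =>
          let window := PySem.List.slice full (some i) (some (i + 3))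
          total + (PySem.List.pyGetD window 0 0 - (PySem.List.slice window (some 1) none).sum)) acc
      = acc + chunkSum (full.drop s) := by
  induction n using Nat.strong_induction_on with
  | _ n ih =>
    intro full s hn acc
    by_cases hlt : s < full.length
    · have h0 : (s : Int) < (full.length : Int) := by exact_mod_cast hlt
      rw [pyRange3_cons _ _ h0]
      simp only [List.foldl_cons]
      have e3 : (s : Int) + 3 = ((s + 3 : Nat) : Int) := by push_cast; ring
      rw [e3, PySem.List.slice_natCast,
          ih (full.length - (s + 3)) (by omega) full (s + 3) rfl]
      have hds : full.drop (s + 3) = (full.drop s).drop 3 := by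
        rw [List.drop_drop]
      rw [hds]
      have htk : s + 3 - s = 3 := by omega
      rw [htk]
      cases hd : full.drop s with
      | nil =>
        have := congrArg List.length hd
        simp at this
        omega
      | cons x r =>
        have ht3 : List.take 3 (x :: r) = x :: r.take 2 := rfl
        have hd3 : List.drop 3 (x :: r) = r.drop 2 := rfl
        rw [ht3, hd3, PySem.List.pyGetD_zero_cons, PySem.List.slice_from_one,
          List.tail_cons, chunkSum_cons x r]
        ring
    · have h1 : (full.length : Int) ≤ (s : Int) := by exact_mod_cast Nat.le_of_not_lt hlt
      rw [pyRange3_nil _ _ h1, List.foldl_nil]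
      have hd : full.drop s = [] := List.drop_eq_nil_of_le (by omega)
      rw [hd]
      simp [chunkSum_nil]

-- ===== VERDICT (by name: the statement is the Claim_ definition above) =====
theorem plus_minus_minus_spec : Claim_equal_plus_minus_minus := by
  intro sequence _
  unfold Spec_plus_minus_minus plus_minus_minus plus_minus_minus_alt
  have hA := pmm_auxA sequence.length sequence 0 (by omega) ⟨0, rfl⟩ 0
  have hB := pmm_auxB sequence.length sequence 0 (by omega) 0
  simp only [Nat.cast_zero] at hA hB
  rw [hA, hB]
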